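-- pv_equiv track=rewrite | github.com/terminal-labs/deep_collections | deep_collections/__init__.py | _simplify_double_splats
-- ===== SOURCE A (Python) =====
-- def _simplify_double_splats(path):
--     """Return an equivalent path, removing any unnecessary double splats."""
--     # remove ending "**"
--     while True:
--         if path and path[-1] == "**":
--             del path[-1]
--         else:
--             break
--
--     # Collapse consecutive "**"
--     i = 0
--     while i < len(path) - 1:
--         if path[i] == "**" == path[i + 1]:
--             del path[i]
--         else:
--             i = i + 1
--
--     return path
-- ===== SOURCE B (Python) =====
-- def _simplify_double_splats(path):
--     """Return an equivalent path, removing any unnecessary double splats.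
--
--     Single forward pass: drop a "**" that directly follows a kept "**",
--     then strip the (at most one) trailing "**". Note: unlike the original,
--     this does not mutate `path`; equivalence is about the return value.
--     """
--     out = []
--     for el in path:
--         if el == "**" and out and out[-1] == "**":
--             continue
--         out.append(el)
--     if out and out[-1] == "**":
--         out.pop()
--     return out
-- ===== Notes on version B (the rewrite author's own statement) =====
-- stated objective: alternative
-- what changed: Replaces A's two in-place deletion loops (strip trailing '**' by repeated del, then collapse runs by del-and-reindex) with one non-mutating forward pass that appends only non-redundant elements, followed by stripping the single possible trailing '**'.
import Mathlib
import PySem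

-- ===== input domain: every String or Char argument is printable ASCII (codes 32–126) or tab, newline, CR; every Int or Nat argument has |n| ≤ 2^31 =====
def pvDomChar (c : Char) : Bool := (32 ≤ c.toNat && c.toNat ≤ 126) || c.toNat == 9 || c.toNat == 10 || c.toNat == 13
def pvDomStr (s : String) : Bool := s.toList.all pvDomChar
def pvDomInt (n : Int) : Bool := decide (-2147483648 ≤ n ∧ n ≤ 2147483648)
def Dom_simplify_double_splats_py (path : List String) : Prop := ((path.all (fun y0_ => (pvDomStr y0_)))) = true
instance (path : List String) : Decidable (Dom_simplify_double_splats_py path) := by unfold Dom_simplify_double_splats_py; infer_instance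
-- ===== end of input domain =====

-- B replaces A's two in-place deletion loops by one non-mutating forward pass
-- plus a single trailing strip. A mutates its argument in place (del); the
-- equivalence proved here is about the RETURN value only.

-- ===== PORT A =====
-- first while loop: delete the last element while it is "**"
def pvStrip (p : List String) : List String :=
  if h : p ≠ [] ∧ PySem.List.pyGet? p (-1) = some "**" then
    pvStrip p.dropLast
  else p
termination_by p.length
decreasing_by
  have hp : p ≠ [] := h.1
  have : 0 < p.length := List.length_pos_iff.mpr hp
  simp [List.length_dropLast]; omega

-- second while loop over index i, with `del path[i]` on a collapse step
def pvCollapseLoop (p : List String) (i : Nat) : List String :=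
  if h : i < p.length - 1 then
    if p[i]? = some "**" ∧ p[i+1]? = some "**" then
      pvCollapseLoop (p.eraseIdx i) i
    else
      pvCollapseLoop p (i+1)
  else p
termination_by p.length - i
decreasing_by
  · rw [List.length_eraseIdx, if_pos (by omega)]; omega
  · omega

def simplify_double_splats_py (path : List String) : List String :=
  pvCollapseLoop (pvStrip path) 0

-- ===== PORT B =====
-- loop body of B's single forward pass
def pvStep (out : List String) (el : String) : List String :=
  if el = "**" ∧ out ≠ [] ∧ PySem.List.pyGet? out (-1) = some "**" then out
  else out ++ [el]

def simplify_double_splats_py_alt (path : List String) : List String :=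
  let out := path.foldl pvStep []
  if out ≠ [] ∧ PySem.List.pyGet? out (-1) = some "**" then out.dropLast else out

-- ===== PRECONDITION & SPEC =====
def Spec_simplify_double_splats_py (path : List String) (out : List String) : Prop := out = simplify_double_splats_py_alt path
instance (path : List String) (out : List String) : Decidable (Spec_simplify_double_splats_py path out) := by unfold Spec_simplify_double_splats_py; infer_instance

-- ===== CLAIM (what is proved, stated in full; the proofs are below) =====
def Claim_equal_simplify_double_splats_py : Prop := ∀ (path : List String), Dom_simplify_double_splats_py path → Spec_simplify_double_splats_py path (simplify_double_splats_py path)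

-- ===== LEMMAS AND PROOFS =====

-- canonical forward collapse of consecutive "**"
def pvCollapse : List String → List String
  | [] => []
  | [a] => [a]
  | a :: b :: t => if a = "**" ∧ b = "**" then pvCollapse (b :: t) else a :: pvCollapse (b :: t)

-- B's accumulator, keyed on the previously kept element
def pvCollapseAux : Option String → List String → List String
  | _, [] => []
  | prev, a :: t => if a = "**" ∧ prev = some "**" then pvCollapseAux prev t
                    else a :: pvCollapseAux (some a) t

theorem pvStrip_nil : pvStrip [] = [] := by
  unfold pvStrip; simp

theorem pvStrip_snoc (q : List String) (a : String) :
    pvStrip (q ++ [a]) = if a = "**" then pvStrip q else q ++ [a] := by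
  rw [pvStrip]
  by_cases ha : a = "**" <;>
    simp [PySem.List.pyGet?_neg_one, ha]

theorem pvCollapse_ne_nil (p : List String) (hp : p ≠ []) : pvCollapse p ≠ [] := by
  induction p with
  | nil => simp at hp
  | cons a t ih =>
    cases t with
    | nil => simp [pvCollapse]
    | cons b t' =>
      rw [pvCollapse]
      split
      · exact ih (by simp)
      · simp

theorem pvCollapse_getLast? (p : List String) : (pvCollapse p).getLast? = p.getLast? := by
  induction p with
  | nil => rfl
  | cons a t ih =>
    cases t with
    | nil => rfl
    | cons b t' =>
      rw [pvCollapse]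
      have hne : pvCollapse (b :: t') ≠ [] := pvCollapse_ne_nil _ (by simp)
      split
      · rename_i h
        rw [ih, List.getLast?_cons_cons]
      · rw [show a :: pvCollapse (b :: t') = [a] ++ pvCollapse (b :: t') from rfl,
           List.getLast?_append_of_ne_nil _ hne, ih, List.getLast?_cons_cons]

theorem pvCollapse_snoc (q : List String) (a : String) :
    pvCollapse (q ++ [a]) =
      if a = "**" ∧ q.getLast? = some "**" then pvCollapse q else pvCollapse q ++ [a] := by
  induction q with
  | nil => simp [pvCollapse]
  | cons x t ih =>
    cases t with
    | nil =>
      by_cases hx : x = "**" <;> by_cases ha : a = "**" <;>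
        simp [pvCollapse, hx, ha]
    | cons y t' =>
      simp only [List.cons_append] at ih ⊢
      rw [pvCollapse, ih]
      by_cases hxy : x = "**" ∧ y = "**" <;>
        by_cases hq : a = "**" ∧ (y :: t').getLast? = some "**" <;>
          simp [pvCollapse, hxy, hq, List.getLast?_cons_cons]

theorem pvCollapseLoop_eq (n : Nat) :
    ∀ (p : List String) (i : Nat), p.length - i ≤ n →
      pvCollapseLoop p i = p.take i ++ pvCollapse (p.drop i) := by
  induction n with
  | zero =>
    intro p i hn
    rw [pvCollapseLoop]
    have hle : p.length ≤ i := by omega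
    rw [dif_neg (by omega)]
    rw [List.take_of_length_le hle, List.drop_of_length_le hle]
    simp [pvCollapse]
  | succ n ih =>
    intro p i hn
    rw [pvCollapseLoop]
    by_cases h : i < p.length - 1
    · rw [dif_pos h]
      have hi : i < p.length := by omega
      have hi1 : i + 1 < p.length := by omega
      have hdrop : p.drop i = p[i] :: p[i+1] :: p.drop (i+2) := by
        rw [List.drop_eq_getElem_cons hi, List.drop_eq_getElem_cons hi1]
      by_cases hss : p[i]? = some "**" ∧ p[i+1]? = some "**"
      · rw [if_pos hss]
        have hgi : p[i] = "**" := by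
          have := hss.1; rwa [List.getElem?_eq_getElem hi, Option.some_inj] at this
        have hgi1 : p[i+1] = "**" := by
          have := hss.2; rwa [List.getElem?_eq_getElem hi1, Option.some_inj] at this
        have herase : p.eraseIdx i = p.take i ++ p.drop (i+1) := List.eraseIdx_eq_take_drop_succ ..
        have hlen : (p.eraseIdx i).length = p.length - 1 := by
          rw [List.length_eraseIdx, if_pos (by omega)]
        rw [ih (p.eraseIdx i) i (by omega)]
        have htake : (p.eraseIdx i).take i = p.take i := by
          rw [herase, List.take_append_of_le_length (by simp; omega)]
          simp
        have hdrop' : (p.eraseIdx i).drop i = p.drop (i+1) := by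
          rw [herase, List.drop_append_of_le_length (by simp; omega)]
          simp
        rw [htake, hdrop']
        have hdrop1 : p.drop (i+1) = p[i+1] :: p.drop (i+2) := List.drop_eq_getElem_cons hi1
        rw [hdrop, hdrop1, hgi, hgi1]
        rw [pvCollapse, if_pos ⟨rfl, rfl⟩]
      · rw [if_neg hss]
        rw [ih p (i+1) (by omega)]
        have : p.take (i+1) = p.take i ++ [p[i]] := List.take_succ_eq_append_getElem hi
        rw [this, hdrop, List.drop_eq_getElem_cons hi1]
        have hne : ¬ (p[i] = "**" ∧ p[i+1] = "**") := by
          intro hc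
          exact hss ⟨by rw [List.getElem?_eq_getElem hi, hc.1],
                     by rw [List.getElem?_eq_getElem hi1, hc.2]⟩
        rw [pvCollapse, if_neg hne]
        simp only [List.append_assoc, List.singleton_append, show i+1+1 = i+2 from rfl]
    · rw [dif_neg h]
      have : p.length ≤ i + 1 := by omega
      rcases Nat.lt_or_ge i p.length with hlt | hge
      · have : p.drop i = [p[i]] := by
          rw [List.drop_eq_getElem_cons hlt]
          have : p.drop (i+1) = [] := List.drop_of_length_le (by omega)
          rw [this]
        rw [this, show pvCollapse [p[i]] = [p[i]] from rfl, ← this,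
           List.take_append_drop]
      · rw [List.take_of_length_le hge, List.drop_of_length_le hge]
        simp [pvCollapse]

theorem pvFoldl_eq (p : List String) :
    ∀ acc : List String, p.foldl pvStep acc = acc ++ pvCollapseAux acc.getLast? p := by
  induction p with
  | nil => intro acc; simp [pvCollapseAux]
  | cons a t ih =>
    intro acc
    rw [List.foldl_cons]
    by_cases hc : a = "**" ∧ acc.getLast? = some "**"
    · have hne : acc ≠ [] := by
        intro h; rw [h] at hc; simp at hc
      have hstep : pvStep acc a = acc := by
        unfold pvStep
        rw [if_pos ⟨hc.1, hne, by rw [PySem.List.pyGet?_neg_one]; exact hc.2⟩]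
      rw [hstep, ih acc, pvCollapseAux, if_pos ⟨hc.1, hc.2⟩]
    · have hstep : pvStep acc a = acc ++ [a] := by
        unfold pvStep
        rw [if_neg (by rw [PySem.List.pyGet?_neg_one]; intro h; exact hc ⟨h.1, h.2.2⟩)]
      rw [hstep, ih (acc ++ [a]), List.getLast?_concat, pvCollapseAux, if_neg hc]
      simp

theorem pvCollapseAux_some (t : List String) :
    ∀ a : String, a :: pvCollapseAux (some a) t = pvCollapse (a :: t) := by
  induction t with
  | nil => intro a; rfl
  | cons b t' ih =>
    intro a
    rw [pvCollapseAux, pvCollapse]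
    by_cases h : b = "**" ∧ a = "**"
    · rw [if_pos (show b = "**" ∧ some a = some "**" from ⟨h.1, by rw [h.2]⟩),
         if_pos ⟨h.2, h.1⟩, h.2, ← h.1, ih b]
    · rw [if_neg (show ¬(b = "**" ∧ some a = some "**") from by simpa using h),
         if_neg (by tauto), ih b]

theorem pvCollapseAux_none (p : List String) : pvCollapseAux none p = pvCollapse p := by
  cases p with
  | nil => rfl
  | cons a t =>
    rw [pvCollapseAux, if_neg (by simp)]
    exact pvCollapseAux_some t a

-- A's pipeline (strip-then-collapse) equals collapse-then-strip-one
theorem pvKey (p : List String) :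
    pvCollapse (pvStrip p) =
      if (pvCollapse p).getLast? = some "**" then (pvCollapse p).dropLast else pvCollapse p := by
  induction p using List.reverseRecOn with
  | nil => simp [pvStrip_nil, pvCollapse]
  | append_singleton q a ih =>
    rw [pvStrip_snoc, pvCollapse_snoc]
    by_cases ha : a = "**"
    · rw [if_pos ha, ih]
      by_cases hq : q.getLast? = some "**"
      · have hCq : (pvCollapse q).getLast? = some "**" := by
          rw [pvCollapse_getLast?]; exact hq
        rw [if_pos (show a = "**" ∧ q.getLast? = some "**" from ⟨ha, hq⟩),
           if_pos hCq]
      · have hCq : ¬ (pvCollapse q).getLast? = some "**" := by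
          rw [pvCollapse_getLast?]; exact hq
        rw [if_neg hCq,
           if_neg (fun hc : a = "**" ∧ q.getLast? = some "**" => hq hc.2),
           List.getLast?_concat,
           if_pos (by rw [ha]), List.dropLast_concat]
    · rw [if_neg ha,
         if_neg (fun hc : a = "**" ∧ q.getLast? = some "**" => ha hc.1),
         pvCollapse_snoc,
         if_neg (fun hc : a = "**" ∧ q.getLast? = some "**" => ha hc.1),
         List.getLast?_concat, if_neg (by simp [ha])]

-- ===== VERDICT (by name: the statement is the Claim_ definition above) =====
theorem simplify_double_splats_py_spec : Claim_equal_simplify_double_splats_py := by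
  intro path _
  unfold Spec_simplify_double_splats_py simplify_double_splats_py simplify_double_splats_py_alt
  rw [pvCollapseLoop_eq (pvStrip path).length (pvStrip path) 0 (by omega)]
  simp only [List.take_zero, List.drop_zero, List.nil_append]
  rw [pvKey path, pvFoldl_eq path []]
  simp only [List.getLast?_nil, List.nil_append, pvCollapseAux_none]
  by_cases h : (pvCollapse path).getLast? = some "**"
  · have hne : pvCollapse path ≠ [] := by intro hc; rw [hc] at h; simp at h
    rw [if_pos h, if_pos ⟨hne, by rw [PySem.List.pyGet?_neg_one]; exact h⟩]
  · rw [if_neg h, if_neg (by rw [PySem.List.pyGet?_neg_one]; tauto)]
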